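-- pv_equiv track=rewrite | github.com/excap3r/chatlumos-api | pdf_wisdom_extractor.py | deduplicate_qa_pairs
-- ===== SOURCE A (Python) =====
-- from typing import List, Dict, Any, Optional, Tuple
--
-- def deduplicate_qa_pairs(qa_pairs: List[Dict]) -> List[Dict]:
--     """Remove duplicate Q&A pairs and keep the most detailed ones."""
--     # Similar to deduplicating concepts
--     qa_dict = {}
--
--     for qa in qa_pairs:
--         if not isinstance(qa, dict) or 'question' not in qa or 'answer' not in qa:
--             continue
--
--         question_key = qa['question'].lower()
--         if question_key in qa_dict:
--             # Keep the longer, more detailed answer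
--             if len(qa['answer']) > len(qa_dict[question_key]['answer']):
--                 qa_dict[question_key] = qa
--         else:
--             qa_dict[question_key] = qa
--
--     return list(qa_dict.values())
-- ===== SOURCE B (Python) =====
-- def deduplicate_qa_pairs(qa_pairs):
--     """Remove duplicate Q&A pairs and keep the most detailed ones.
--
--     Two passes: group valid entries into buckets by lowercased question,
--     then pick the longest-answer entry (first maximal on ties) per bucket."""
--     groups = {}
--     for qa in qa_pairs:
--         if not isinstance(qa, dict) or 'question' not in qa or 'answer' not in qa:
--             continue
--         groups.setdefault(qa['question'].lower(), []).append(qa)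
--     return [max(bucket, key=lambda q: len(q['answer'])) for bucket in groups.values()]
-- ===== Notes on version B (the rewrite author's own statement) =====
-- stated objective: alternative
-- what changed: B replaces A's single pass with a running best-per-key dict by two passes: first group valid entries into buckets keyed by lowercased question, then select max(bucket, key=answer length) per bucket.
import Mathlib
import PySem

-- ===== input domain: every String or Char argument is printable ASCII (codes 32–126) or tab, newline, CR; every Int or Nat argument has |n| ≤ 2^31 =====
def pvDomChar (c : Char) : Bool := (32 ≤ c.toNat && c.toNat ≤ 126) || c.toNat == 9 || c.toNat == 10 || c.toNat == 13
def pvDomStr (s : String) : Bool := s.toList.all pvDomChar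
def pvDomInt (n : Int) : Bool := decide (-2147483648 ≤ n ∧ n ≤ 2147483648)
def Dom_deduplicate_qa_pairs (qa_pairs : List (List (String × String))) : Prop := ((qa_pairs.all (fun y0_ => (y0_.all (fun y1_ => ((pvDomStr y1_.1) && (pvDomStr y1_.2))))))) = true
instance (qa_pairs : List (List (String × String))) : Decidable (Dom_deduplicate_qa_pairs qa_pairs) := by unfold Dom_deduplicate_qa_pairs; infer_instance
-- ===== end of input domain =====

-- B re-decomposes A's one-pass running-best dict into two passes (group into buckets, then pick the
-- first longest-answer entry per bucket); same cost, alternative decomposition. Equal return values proved.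

-- ===== PORT A =====
-- Each Python dict is represented as an insertion-order association list; it is canonicalised
-- through PySem.Dict.ofList (Python dict semantics: later duplicate keys overwrite in place).
-- One step of A's loop body (qa_dict[key]['answer'] always exists when reached, so getD's "" default is never used).
def pvStepA (d : PySem.Dict String (PySem.Dict String String)) (qa0 : List (String × String)) :
    PySem.Dict String (PySem.Dict String String) :=
  match (PySem.Dict.ofList qa0).get? "question", (PySem.Dict.ofList qa0).get? "answer" with
  | some q, some a =>
    let key := PySem.Str.lower q
    match d.get? key with
    | some prev =>
      if PySem.Str.len (prev.getD "answer" "") < PySem.Str.len a then d.insert key (PySem.Dict.ofList qa0) else d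
    | none => d.insert key (PySem.Dict.ofList qa0)
  | _, _ => d

def deduplicate_qa_pairs (qa_pairs : List (List (String × String))) : List (List (String × String)) :=
  let qa_dict := qa_pairs.foldl pvStepA PySem.Dict.empty
  qa_dict.values.map PySem.Dict.items

-- ===== PORT B =====
-- len(q['answer']) used as the max key ('answer' always present in a bucket entry; "" default never used)
def pvAnsLen (q : PySem.Dict String String) : Int := PySem.Str.len (q.getD "answer" "")

-- max(bucket, key=lambda q: len(q['answer'])): first maximal element (buckets are never empty;
-- the [] case is unreachable)
def pvMaxAns : List (PySem.Dict String String) → PySem.Dict String String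
  | [] => PySem.Dict.empty
  | x :: xs => xs.foldl (fun best q => if pvAnsLen best < pvAnsLen q then q else best) x

-- first pass: groups.setdefault(key, []).append(qa), i.e. groups[key] = groups.get(key, []) + [qa]
def pvStepB (g : PySem.Dict String (List (PySem.Dict String String))) (qa0 : List (String × String)) :
    PySem.Dict String (List (PySem.Dict String String)) :=
  match (PySem.Dict.ofList qa0).get? "question", (PySem.Dict.ofList qa0).get? "answer" with
  | some q, some _ =>
    g.modify (PySem.Str.lower q) [] (· ++ [PySem.Dict.ofList qa0])
  | _, _ => g

def deduplicate_qa_pairs_alt (qa_pairs : List (List (String × String))) : List (List (String × String)) :=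
  let groups := qa_pairs.foldl pvStepB PySem.Dict.empty
  groups.values.map (fun bucket => (pvMaxAns bucket).items)

-- ===== PRECONDITION & SPEC =====
def Spec_deduplicate_qa_pairs (qa_pairs : List (List (String × String))) (out : List (List (String × String))) : Prop := out = deduplicate_qa_pairs_alt qa_pairs
instance (qa_pairs : List (List (String × String))) (out : List (List (String × String))) : Decidable (Spec_deduplicate_qa_pairs qa_pairs out) := by unfold Spec_deduplicate_qa_pairs; infer_instance

-- ===== CLAIM (what is proved, stated in full; the proofs are below) =====
def Claim_equal_deduplicate_qa_pairs : Prop := ∀ (qa_pairs : List (List (String × String))), Dom_deduplicate_qa_pairs qa_pairs → Spec_deduplicate_qa_pairs qa_pairs (deduplicate_qa_pairs qa_pairs)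

-- ===== LEMMAS AND PROOFS =====

-- value map relating B's buckets to A's running best
def pvMapF (p : String × List (PySem.Dict String String)) : String × PySem.Dict String String :=
  (p.1, pvMaxAns p.2)

-- loop invariant: A's dict is B's grouping dict with each bucket reduced by pvMaxAns,
-- buckets are nonempty, and B's keys are unique
def pvRel (dA : PySem.Dict String (PySem.Dict String String))
    (dB : PySem.Dict String (List (PySem.Dict String String))) : Prop :=
  dA.items = dB.items.map pvMapF ∧ (∀ p ∈ dB.items, p.2 ≠ []) ∧ dB.keys.Nodup

lemma pvRel_get? {dA : PySem.Dict String (PySem.Dict String String)}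
    {dB : PySem.Dict String (List (PySem.Dict String String))}
    (h : pvRel dA dB) (k : String) :
    dA.get? k = (dB.get? k).map pvMaxAns := by
  obtain ⟨h1, -, -⟩ := h
  simp only [PySem.Dict.get?, h1, List.find?_map]
  have hcomp : ((fun p : String × PySem.Dict String String => p.1 == k) ∘ pvMapF)
      = (fun p : String × List (PySem.Dict String String) => p.1 == k) := rfl
  rw [hcomp]
  cases dB.items.find? (fun p => p.1 == k) <;> rfl

lemma pvMaxAns_append_singleton (l : List (PySem.Dict String String)) (hl : l ≠ []) (qa : PySem.Dict String String) :
    pvMaxAns (l ++ [qa]) = if pvAnsLen (pvMaxAns l) < pvAnsLen qa then qa else pvMaxAns l := by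
  cases l with
  | nil => exact absurd rfl hl
  | cons x xs => simp [pvMaxAns, List.foldl_append]

lemma pvStep_rel {dA : PySem.Dict String (PySem.Dict String String)}
    {dB : PySem.Dict String (List (PySem.Dict String String))}
    (h : pvRel dA dB) (qa0 : List (String × String)) :
    pvRel (pvStepA dA qa0) (pvStepB dB qa0) := by
  obtain ⟨h1, h2, h3⟩ := h
  unfold pvStepA pvStepB
  cases hq : (PySem.Dict.ofList qa0).get? "question" with
  | none => exact ⟨h1, h2, h3⟩
  | some q =>
    cases ha : (PySem.Dict.ofList qa0).get? "answer" with
    | none => exact ⟨h1, h2, h3⟩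
    | some a =>
      simp only
      set qa := PySem.Dict.ofList qa0 with hqa
      set key := PySem.Str.lower q with hkey
      have hget := pvRel_get? ⟨h1, h2, h3⟩ key
      have hcont : dA.contains key = dB.contains key := by
        rw [PySem.Dict.contains_eq_isSome_get?, PySem.Dict.contains_eq_isSome_get?, hget]
        cases dB.get? key <;> rfl
      cases hbg : dB.get? key with
      | none =>
        -- key not yet present on either side: both append a fresh entry
        have hcB : dB.contains key = false := by
          rw [PySem.Dict.contains_eq_isSome_get?, hbg]; rfl
        have hcA : dA.contains key = false := by rw [hcont]; exact hcB
        rw [hget, hbg]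
        simp only [Option.map_none]
        refine ⟨?_, ?_, ?_⟩
        · rw [PySem.Dict.items_insert_of_not_contains _ _ hcA, PySem.Dict.modify,
            PySem.Dict.items_insert_of_not_contains _ _ hcB,
            PySem.Dict.getD_of_not_contains _ _ hcB, h1]
          simp [pvMapF, pvMaxAns]
        · intro p hp
          rw [PySem.Dict.modify, PySem.Dict.items_insert_of_not_contains _ _ hcB,
            PySem.Dict.getD_of_not_contains _ _ hcB] at hp
          rcases List.mem_append.1 hp with hp | hp
          · exact h2 p hp
          · simp only [List.mem_singleton] at hp; subst hp; simp
        · exact PySem.Dict.nodup_keys_insert _ _ _ h3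
      | some fb =>
        have hcB : dB.contains key = true := by
          rw [PySem.Dict.contains_eq_isSome_get?, hbg]; rfl
        have hcA : dA.contains key = true := by rw [hcont]; exact hcB
        have hfbmem : (key, fb) ∈ dB.items := PySem.Dict.mem_items_of_get?_eq_some dB hbg
        have hfbne : fb ≠ [] := h2 _ hfbmem
        have hgD : dB.getD key [] = fb := by
          rw [PySem.Dict.getD_eq_get?_getD, hbg]; rfl
        rw [hget, hbg]
        simp only [Option.map_some]
        have hmax := pvMaxAns_append_singleton fb hfbne qa
        refine ⟨?_, ?_, ?_⟩
        · -- items relation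
          by_cases hlt : PySem.Str.len ((pvMaxAns fb).getD "answer" "") < PySem.Str.len a
          · -- A replaces with qa; B's enlarged bucket has max qa
            have hlt' : pvAnsLen (pvMaxAns fb) < pvAnsLen qa := by
              simpa [pvAnsLen, PySem.Dict.getD_eq_get?_getD, ha] using hlt
            rw [if_pos hlt, PySem.Dict.items_insert_of_contains dA qa hcA, h1,
              PySem.Dict.modify, PySem.Dict.items_insert_of_contains dB _ hcB, hgD,
              List.map_map, List.map_map]
            refine List.map_congr_left (fun p _ => ?_)
            by_cases hpk : p.1 = key
            · simp [pvMapF, hpk, hmax, hlt']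
            · simp [pvMapF, hpk]
          · -- A keeps the old entry; B's enlarged bucket has the same max
            have hlt' : ¬ pvAnsLen (pvMaxAns fb) < pvAnsLen qa := by
              simpa [pvAnsLen, PySem.Dict.getD_eq_get?_getD, ha] using hlt
            rw [if_neg hlt, PySem.Dict.modify, PySem.Dict.items_insert_of_contains dB _ hcB,
              hgD, h1, List.map_map]
            refine List.map_congr_left (fun p hp => ?_)
            by_cases hpk : p.1 = key
            · -- unique keys: the matched bucket IS fb
              have hfind : dB.get? p.1 = some p.2 :=
                PySem.Dict.get?_of_mem_items dB (by simpa using hp) h3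
              rw [hpk, hbg] at hfind
              have hpfb : p.2 = fb := by injection hfind with h'; exact h'.symm
              simp [pvMapF, hpk, hmax, hlt', hpfb]
            · simp [pvMapF, hpk]
        · -- buckets stay nonempty
          intro p hp
          rw [PySem.Dict.modify, PySem.Dict.items_insert_of_contains dB _ hcB] at hp
          rcases List.mem_map.1 hp with ⟨p', hp', hpe⟩
          by_cases hpk : (p'.1 == key) = true
          · rw [if_pos hpk] at hpe; rw [← hpe]; simp
          · rw [if_neg hpk] at hpe; rw [← hpe]; exact h2 p' hp'
        · -- keys stay unique
          exact PySem.Dict.nodup_keys_insert _ _ _ h3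

lemma pvFoldl_rel (qa_pairs : List (List (String × String)))
    {dA dB} (h : pvRel dA dB) :
    pvRel (qa_pairs.foldl pvStepA dA) (qa_pairs.foldl pvStepB dB) := by
  induction qa_pairs generalizing dA dB with
  | nil => exact h
  | cons x xs ih => exact ih (pvStep_rel h x)

-- ===== VERDICT (by name: the statement is the Claim_ definition above) =====
theorem deduplicate_qa_pairs_spec : Claim_equal_deduplicate_qa_pairs := by
  intro qa_pairs _
  unfold Spec_deduplicate_qa_pairs deduplicate_qa_pairs deduplicate_qa_pairs_alt
  have hrel : pvRel (qa_pairs.foldl pvStepA PySem.Dict.empty)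
      (qa_pairs.foldl pvStepB PySem.Dict.empty) :=
    pvFoldl_rel qa_pairs ⟨rfl, by simp [PySem.Dict.empty], by simp [PySem.Dict.empty, PySem.Dict.keys]⟩
  obtain ⟨h1, -, -⟩ := hrel
  simp only [PySem.Dict.values, h1, List.map_map]
  rfl
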